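-- pv_equiv track=rewrite | github.com/XinyunChi7/amiga_removal_manip_IL | act_pred_models/act_reg/reg_data_prep_single.py | calculate_row_differences
-- ===== SOURCE A (Python) =====
-- def calculate_row_differences(rows):
--     differences = []
--     prev_row = None
--
--     for row in rows:
--         if row and prev_row:
--             diff = [b - a for a, b in zip(prev_row, row)]
--             differences.append(diff)
--         prev_row = row if row else prev_row
--
--     return differences
-- ===== SOURCE B (Python) =====
-- def calculate_row_differences(rows):
--     if not rows:
--         return []
--     head, rest = rows[0], rows[1:]
--     if not head:
--         return calculate_row_differences(rest)
--     nxt = next((r for r in rest if r), None)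
--     if nxt is None:
--         return []
--     diff = [nxt[i] - head[i] for i in range(min(len(head), len(nxt)))]
--     return [diff] + calculate_row_differences(rest)
-- ===== Notes on version B (the rewrite author's own statement) =====
-- stated objective: alternative
-- what changed: Replaces A's single stateful loop carrying prev_row with structural recursion: at each non-empty row it looks ahead for the next non-empty row and subtracts by index up to the shorter length, maintaining no running state.
import Mathlib
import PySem

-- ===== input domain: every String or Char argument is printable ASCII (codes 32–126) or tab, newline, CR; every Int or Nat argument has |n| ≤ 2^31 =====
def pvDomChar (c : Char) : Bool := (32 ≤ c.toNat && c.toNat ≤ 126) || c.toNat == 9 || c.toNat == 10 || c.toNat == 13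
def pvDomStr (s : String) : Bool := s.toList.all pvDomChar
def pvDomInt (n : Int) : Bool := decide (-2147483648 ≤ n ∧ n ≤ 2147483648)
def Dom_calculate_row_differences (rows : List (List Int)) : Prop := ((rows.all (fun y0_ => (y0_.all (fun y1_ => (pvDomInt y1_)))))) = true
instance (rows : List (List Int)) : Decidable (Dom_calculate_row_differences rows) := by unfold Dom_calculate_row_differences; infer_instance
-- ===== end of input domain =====

-- B replaces A's stateful prev_row loop by stateless structural recursion with a forward lookahead
-- for the next non-empty row; return values proved equal (objective: alternative decomposition).
-- ===== PORT A =====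
-- loop state: accumulated `differences` and `prev_row` (none = Python's None)
def crdLoop (rows : List (List Int)) (diffs : List (List Int)) (prev : Option (List Int)) : List (List Int) :=
  match rows with
  | [] => diffs
  | row :: rest =>
    let diffs' :=
      match prev with
      | some p => if row ≠ [] ∧ p ≠ [] then diffs ++ [(p.zip row).map (fun ab => ab.2 - ab.1)] else diffs
      | none => diffs
    let prev' := if row ≠ [] then some row else prev
    crdLoop rest diffs' prev'

def calculate_row_differences (rows : List (List Int)) : List (List Int) :=
  crdLoop rows [] none

-- ===== PORT B =====
-- `next((r for r in rest if r), None)` is rest.find? (· ≠ []); indices in the comprehension are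
-- in range (i < min of both lengths), so getD is exact for Python's r[i] here.
def calculate_row_differences_alt (rows : List (List Int)) : List (List Int) :=
  match rows with
  | [] => []
  | head :: rest =>
    if head = [] then calculate_row_differences_alt rest
    else
      match rest.find? (fun r => r ≠ []) with
      | none => []
      | some nxt =>
        ((List.range (min head.length nxt.length)).map
          (fun i => nxt.getD i 0 - head.getD i 0)) :: calculate_row_differences_alt rest

-- ===== PRECONDITION & SPEC =====
def Spec_calculate_row_differences (rows : List (List Int)) (out : List (List Int)) : Prop := out = calculate_row_differences_alt rows
instance (rows : List (List Int)) (out : List (List Int)) : Decidable (Spec_calculate_row_differences rows out) := by unfold Spec_calculate_row_differences; infer_instance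

-- ===== CLAIM (what is proved, stated in full; the proofs are below) =====
def Claim_equal_calculate_row_differences : Prop := ∀ (rows : List (List Int)), Dom_calculate_row_differences rows → Spec_calculate_row_differences rows (calculate_row_differences rows)

-- ===== LEMMAS AND PROOFS =====
-- pairwise differences of consecutive elements of a list: common normal form of both ports
def pvPairs (l : List (List Int)) : List (List Int) :=
  (l.zip l.tail).map (fun pc => (pc.1.zip pc.2).map (fun ab => ab.2 - ab.1))

lemma pvPairs_cons_cons (p r : List Int) (l : List (List Int)) :
    pvPairs (p :: r :: l) = (p.zip r).map (fun ab => ab.2 - ab.1) :: pvPairs (r :: l) := by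
  simp [pvPairs]

lemma crdLoop_some (rows : List (List Int)) : ∀ (diffs : List (List Int)) (p : List Int), p ≠ [] →
    crdLoop rows diffs (some p) = diffs ++ pvPairs (p :: rows.filter (fun r => decide (r ≠ []))) := by
  induction rows with
  | nil => intro diffs p hp; simp [crdLoop, pvPairs]
  | cons row rest ih =>
    intro diffs p hp
    by_cases hr : row = []
    · subst hr
      simp [crdLoop, hp, ih diffs p hp]
    · simp only [crdLoop, hp, hr, ne_eq, not_false_eq_true, and_self, if_pos]
      rw [ih _ row hr]
      simp [hr, pvPairs_cons_cons]

lemma crdLoop_none (rows : List (List Int)) : ∀ (diffs : List (List Int)),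
    crdLoop rows diffs none = diffs ++ pvPairs (rows.filter (fun r => decide (r ≠ []))) := by
  induction rows with
  | nil => intro diffs; simp [crdLoop, pvPairs]
  | cons row rest ih =>
    intro diffs
    by_cases hr : row = []
    · subst hr; simp [crdLoop, ih diffs]
    · simp only [crdLoop, hr, ne_eq, not_false_eq_true, if_true]
      rw [crdLoop_some rest diffs row hr]
      simp [hr]

lemma find?_eq_head?_filter (p : List Int → Bool) (l : List (List Int)) :
    l.find? p = (l.filter p).head? := by
  induction l with
  | nil => simp
  | cons x t ih =>
    cases hx : p x
    · rw [List.find?_cons, hx, List.filter_cons, hx]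
      show List.find? p t = (List.filter p t).head?
      exact ih
    · rw [List.find?_cons, hx, List.filter_cons, hx]
      simp

lemma range_map_eq_zip_map (a b : List Int) :
    (List.range (min a.length b.length)).map (fun i => b.getD i 0 - a.getD i 0)
      = (a.zip b).map (fun ab => ab.2 - ab.1) := by
  apply List.ext_getElem
  · simp
  · intro i h1 h2
    simp at h1 h2
    simp [List.getD, h2.1, h2.2]

lemma alt_eq_pvPairs_filter (rows : List (List Int)) :
    calculate_row_differences_alt rows = pvPairs (rows.filter (fun r => decide (r ≠ []))) := by
  induction rows with
  | nil => simp [calculate_row_differences_alt, pvPairs]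
  | cons head rest ih =>
    by_cases hh : head = []
    · rw [show calculate_row_differences_alt (head :: rest) = calculate_row_differences_alt rest
            by simp [calculate_row_differences_alt, hh]]
      rw [List.filter_cons_of_neg (by simp [hh]), ih]
    · have hph : (fun r => decide (r ≠ [])) head = true := by simp [hh]
      rw [show calculate_row_differences_alt (head :: rest)
            = (match rest.find? (fun r => r ≠ []) with
               | none => []
               | some nxt =>
                 ((List.range (min head.length nxt.length)).map
                   (fun i => nxt.getD i 0 - head.getD i 0)) :: calculate_row_differences_alt rest)
            from by simp only [calculate_row_differences_alt, if_neg hh]]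
      have hfc : List.filter (fun r => decide (r ≠ [])) (head :: rest)
          = head :: List.filter (fun r => decide (r ≠ [])) rest := by
        rw [List.filter_cons, if_pos hph]
      rw [find?_eq_head?_filter, hfc]
      rcases hf : (rest.filter (fun r => decide (r ≠ []))) with _ | ⟨nxt, t⟩
      · simp [pvPairs]
      · simp only [List.head?]
        rw [range_map_eq_zip_map, pvPairs_cons_cons, ← hf, ih]

-- ===== VERDICT (by name: the statement is the Claim_ definition above) =====
theorem calculate_row_differences_spec : Claim_equal_calculate_row_differences := by
  intro rows _
  unfold Spec_calculate_row_differences calculate_row_differences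
  rw [crdLoop_none rows [], alt_eq_pvPairs_filter]
  simp
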